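-- pv_equiv track=rewrite | github.com/Louis-DR/j2gpp_verilog | j2gpp_verilog/filters.py | priority_encode
-- ===== SOURCE A (Python) =====
-- def priority_encode(signals):
--   if not signals:
--     return "'0"
--   if len(signals) == 1:
--     name, value = next(iter(signals.items()))
--     return value
--   items = list(signals.items())
--   expr = items[-1][1]
--   for name, value in reversed(items[:-1]):
--     expr = f"{name} ? {value} : ({expr})"
--   return expr
-- ===== SOURCE B (Python) =====
-- def priority_encode(signals):
--   items = list(signals.items())
--   if not items:
--     return "'0"
--   def encode(chain, tail):
--     # nested ternary expression selecting over chain, falling back to expression tail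
--     if not chain:
--       return tail
--     if len(chain) == 1:
--       name, value = chain[0]
--       return f"{name} ? {value} : ({tail})"
--     mid = len(chain) // 2
--     return encode(chain[:mid], encode(chain[mid:], tail))
--   return encode(items[:-1], items[-1][1])
-- ===== Notes on version B (the rewrite author's own statement) =====
-- stated objective: alternative
-- what changed: Replaces A's reverse-iteration loop that rewraps a growing accumulator string with a divide-and-conquer recursion: encode(chain, tail) splits the chain in half and nests the encoding of the left half around that of the right half, with empty/singleton base cases.
import Mathlib
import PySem

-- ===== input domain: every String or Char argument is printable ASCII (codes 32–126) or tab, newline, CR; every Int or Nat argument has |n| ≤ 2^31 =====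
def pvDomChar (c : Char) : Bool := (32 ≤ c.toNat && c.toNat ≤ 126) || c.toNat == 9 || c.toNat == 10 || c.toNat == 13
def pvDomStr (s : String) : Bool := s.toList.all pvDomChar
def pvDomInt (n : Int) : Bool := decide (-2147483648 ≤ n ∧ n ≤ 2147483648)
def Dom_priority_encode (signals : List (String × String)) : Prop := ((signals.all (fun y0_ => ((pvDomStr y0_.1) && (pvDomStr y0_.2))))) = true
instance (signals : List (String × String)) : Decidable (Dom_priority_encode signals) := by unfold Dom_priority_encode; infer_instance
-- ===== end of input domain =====

-- B: top-down structural recursion over the items instead of A's reverse-loop accumulator (objective: alternative decomposition).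
-- ===== PORT A =====
def priority_encode (signals : List (String × String)) : String :=
  if signals.isEmpty then "'0"
  else if signals.length == 1 then (signals.headD ("", "")).2
  else
    let items := signals
    let expr := ((PySem.List.pyGet? items (-1)).getD ("", "")).2
    (PySem.List.slice items none (some (-1))).reverse.foldl
      (fun expr nv => nv.1 ++ " ? " ++ nv.2 ++ " : (" ++ expr ++ ")") expr

-- ===== PORT B =====
def pvEnc (chain : List (String × String)) (tail : String) : String :=
  if chain.isEmpty then tail
  else if chain.length == 1 then
    let nv := chain.headD ("", "")
    nv.1 ++ " ? " ++ nv.2 ++ " : (" ++ tail ++ ")"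
  else
    let mid := chain.length / 2
    pvEnc (chain.take mid) (pvEnc (chain.drop mid) tail)
termination_by chain.length
decreasing_by
  all_goals
    rename_i h1 h2
    simp only [List.isEmpty_iff_length_eq_zero] at h1
    simp only [beq_iff_eq] at h2
    first
      | (rw [List.length_drop]; omega)
      | (rw [List.length_take]; omega)

def priority_encode_alt (signals : List (String × String)) : String :=
  let items := signals
  if items.isEmpty then "'0"
  else pvEnc (PySem.List.slice items none (some (-1)))
        (((PySem.List.pyGet? items (-1)).getD ("", "")).2)

-- ===== PRECONDITION & SPEC =====
def Spec_priority_encode (signals : List (String × String)) (out : String) : Prop := out = priority_encode_alt signals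
instance (signals : List (String × String)) (out : String) : Decidable (Spec_priority_encode signals out) := by unfold Spec_priority_encode; infer_instance

-- ===== CLAIM (what is proved, stated in full; the proofs are below) =====
def Claim_equal_priority_encode : Prop := ∀ (signals : List (String × String)), Dom_priority_encode signals → Spec_priority_encode signals (priority_encode signals)

-- ===== LEMMAS AND PROOFS =====

-- ===== VERDICT (by name: the statement is the Claim_ definition above) =====
def pvWrap (nv : String × String) (e : String) : String :=
  nv.1 ++ " ? " ++ nv.2 ++ " : (" ++ e ++ ")"

lemma pvEnc_eq_foldr_aux (n : Nat) : ∀ (chain : List (String × String)) (tail : String),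
    chain.length ≤ n → pvEnc chain tail = chain.foldr pvWrap tail := by
  induction n with
  | zero =>
    intro chain tail hle
    have : chain = [] := by cases chain <;> simp_all
    subst this
    rw [pvEnc]; simp
  | succ n ih =>
    intro chain tail hle
    rw [pvEnc]
    by_cases he : chain.isEmpty
    · have : chain = [] := List.isEmpty_iff.mp he
      subst this; simp
    · rw [if_neg he]
      by_cases h1 : chain.length == 1
      · rw [if_pos h1]
        cases chain with
        | nil => simp at he
        | cons p rest =>
          have : rest = [] := by
            rw [beq_iff_eq] at h1; simpa using h1
          subst this
          simp [pvWrap]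
      · rw [if_neg h1]
        have hne : chain.length ≠ 0 := by
          simpa [List.isEmpty_iff_length_eq_zero] using he
        rw [beq_iff_eq] at h1
        rw [ih _ _ (by rw [List.length_take]; omega),
            ih _ _ (by rw [List.length_drop]; omega),
            ← List.foldr_append, List.take_append_drop]

lemma pvEnc_eq_foldr (chain : List (String × String)) (tail : String) :
    pvEnc chain tail = chain.foldr pvWrap tail :=
  pvEnc_eq_foldr_aux chain.length chain tail le_rfl

theorem priority_encode_spec : Claim_equal_priority_encode := by
  intro signals _
  unfold Spec_priority_encode priority_encode priority_encode_alt
  cases signals with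
  | nil => simp
  | cons p l =>
    cases l with
    | nil =>
      simp only [PySem.List.slice_to_neg_one, PySem.List.pyGet?_neg_one]
      rw [pvEnc]
      simp
    | cons q rest =>
      simp only [List.isEmpty_cons, List.length_cons, PySem.List.slice_to_neg_one,
        PySem.List.pyGet?_neg_one]
      rw [if_neg (by simp), if_neg (by simp), pvEnc_eq_foldr, ← List.foldl_reverse]
      rfl
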